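-- pv_equiv track=rewrite | github.com/leo-tasso/STS | test/solution_checker_no_recursion.py | get_periods
-- ===== SOURCE A (Python) =====
-- def get_periods(solution, n):
--     """Get all periods from the solution using direct iteration with robust structure handling."""
--     periods = []
--
--     def find_periods(obj, depth=0, max_depth=10):
--         """Find periods in nested structure."""
--         if max_depth <= 0 or not isinstance(obj, list):
--             return
--
--         # A period should be a list of weeks, where each week contains matches
--         # Try to identify periods by looking for the expected structure
--         if all(isinstance(item, list) for item in obj):
--             # Check if this could be a period (list of weeks)
--             if len(obj) == n and all(isinstance(week, list) and
--                                    all(isinstance(match, list) and len(match) == 2 and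
--                                        all(isinstance(team, int) for team in match)
--                                        for match in week)
--                                    for week in obj):
--                 periods.append(obj)
--                 return
--
--         # Continue searching deeper
--         for item in obj:
--             find_periods(item, depth + 1, max_depth - 1)
--
--     find_periods(solution)
--     return periods
-- ===== SOURCE B (Python) =====
-- def get_periods(solution, n):
--     """Iterative pre-order DFS with an explicit stack instead of the recursive helper."""
--     periods = []
--     stack = [(solution, 10)]
--     while stack:
--         obj, md = stack.pop()
--         if md <= 0 or not isinstance(obj, list):
--             continue
--         if (all(isinstance(item, list) for item in obj)
--                 and len(obj) == n
--                 and all(isinstance(week, list)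
--                         and all(isinstance(match, list) and len(match) == 2
--                                 and all(isinstance(team, int) for team in match)
--                                 for match in week)
--                         for week in obj)):
--             periods.append(obj)
--             continue
--         for item in reversed(obj):
--             stack.append((item, md - 1))
--     return periods
-- ===== Notes on version B (the rewrite author's own statement) =====
-- stated objective: alternative
-- what changed: The recursive nested helper find_periods is replaced by an iterative pre-order DFS over an explicit stack of (node, remaining_depth) pairs, pushing children in reverse so they pop left-to-right; the period-shape test is unchanged.
import Mathlib
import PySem

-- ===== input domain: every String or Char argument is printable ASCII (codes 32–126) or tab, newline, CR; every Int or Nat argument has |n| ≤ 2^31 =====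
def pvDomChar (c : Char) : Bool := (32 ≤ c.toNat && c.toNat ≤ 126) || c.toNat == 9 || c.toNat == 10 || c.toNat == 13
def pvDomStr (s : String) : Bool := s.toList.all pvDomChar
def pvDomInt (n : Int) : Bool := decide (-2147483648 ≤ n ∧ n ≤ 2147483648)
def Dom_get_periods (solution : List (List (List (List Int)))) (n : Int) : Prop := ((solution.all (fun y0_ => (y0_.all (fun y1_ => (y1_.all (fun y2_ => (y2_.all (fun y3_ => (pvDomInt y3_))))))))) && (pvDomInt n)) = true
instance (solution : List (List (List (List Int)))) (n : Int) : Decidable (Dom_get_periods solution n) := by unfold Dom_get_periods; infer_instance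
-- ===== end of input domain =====

-- B replaces the recursive nested helper by an iterative pre-order DFS over an explicit stack
-- of (node, remaining-depth) pairs (objective: alternative decomposition, same cost).
--
-- Both ports transliterate the one dynamically-typed Python function at each of the five static
-- nesting levels the typed input admits (ints, List Int, …, the depth-4 solution).  The Python
-- period-shape test specialises at each level as follows (comments mark where this is exact):
--  * level 4 (the solution itself): `isinstance(team, int)` is False for the depth-1 lists, so the
--    test holds iff len == n and every week has only matches that are lists of length 2 with no
--    elements — i.e. never, except when every week is empty;
--  * level 3: teams really are ints — the genuine period shape (len == n, every match of length 2);
--  * level 2: `isinstance(match, list)` is False for ints, so the test needs every week empty;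
--  * level 1 (List Int): `all(isinstance(item, list))` holds iff the list is empty.
-- When the degenerate levels 4/2/1 match, Python appends a value all of whose sublists are empty;
-- the ports append the SAME value written at the output's depth (co4/co2/[]), which is exact there.

-- shared transliterations of the Python shape test, one per static level (identical text in A and B)
def chk1 (x : List Int) (n : Int) : Bool :=
  -- all(isinstance(item,list)) over ints ⟺ x = []; inner week-test then vacuous
  x.all (fun _ => false) && (Int.ofNat x.length == n)
def chk2 (x : List (List Int)) (n : Int) : Bool :=
  -- items are lists; isinstance(match,list) is False for int matches
  (Int.ofNat x.length == n) && x.all (fun w => w.all (fun _ => false))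
def chk3 (x : List (List (List Int))) (n : Int) : Bool :=
  -- the genuine period shape: teams are ints, so only len(match) == 2 remains
  (Int.ofNat x.length == n) && x.all (fun w => w.all (fun m => Int.ofNat m.length == 2))
def chk4 (x : List (List (List (List Int)))) (n : Int) : Bool :=
  -- isinstance(team,int) is False for list teams
  (Int.ofNat x.length == n) && x.all (fun w => w.all (fun m => (Int.ofNat m.length == 2) && m.all (fun _ => false)))

-- the value Python appends at the degenerate levels, written at the output depth (exact: all
-- sublists are empty whenever the corresponding chk holds)
def co2 (x : List (List Int)) : List (List (List Int)) :=
  x.map (fun w => w.map (fun _ => ([] : List Int)))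
def co4 (x : List (List (List (List Int)))) : List (List (List Int)) :=
  x.map (fun _ => ([] : List (List Int)))

-- ===== PORT A =====
-- find_periods specialised at each level; `periods` is the accumulator list being appended to.
def findL0 (periods : List (List (List (List Int)))) (_obj : Int) (_md _n : Int) :
    List (List (List (List Int))) := periods            -- not a list: return
def findL1 (periods : List (List (List (List Int)))) (obj : List Int) (md n : Int) :
    List (List (List (List Int))) :=
  if md ≤ 0 then periods
  else if chk1 obj n then periods ++ [[]]               -- obj = [] here
  else obj.foldl (fun acc item => findL0 acc item (md - 1) n) periods
def findL2 (periods : List (List (List (List Int)))) (obj : List (List Int)) (md n : Int) :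
    List (List (List (List Int))) :=
  if md ≤ 0 then periods
  else if chk2 obj n then periods ++ [co2 obj]
  else obj.foldl (fun acc item => findL1 acc item (md - 1) n) periods
def findL3 (periods : List (List (List (List Int)))) (obj : List (List (List Int))) (md n : Int) :
    List (List (List (List Int))) :=
  if md ≤ 0 then periods
  else if chk3 obj n then periods ++ [obj]
  else obj.foldl (fun acc item => findL2 acc item (md - 1) n) periods
def findL4 (periods : List (List (List (List Int)))) (obj : List (List (List (List Int)))) (md n : Int) :
    List (List (List (List Int))) :=
  if md ≤ 0 then periods
  else if chk4 obj n then periods ++ [co4 obj]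
  else obj.foldl (fun acc item => findL3 acc item (md - 1) n) periods

def get_periods (solution : List (List (List (List Int)))) (n : Int) : List (List (List (List Int))) :=
  findL4 [] solution 10 n                               -- find_periods(solution, 0, 10)

-- ===== PORT B =====
-- a dynamically-typed Python stack entry: one node of the nested structure
inductive PVNode where
  | n0 : Int → PVNode
  | n1 : List Int → PVNode
  | n2 : List (List Int) → PVNode
  | n3 : List (List (List Int)) → PVNode
  | n4 : List (List (List (List Int))) → PVNode
deriving DecidableEq, Repr

def nsz : PVNode → Nat
  | .n0 _ => 1
  | .n1 x => x.length + 1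
  | .n2 x => (x.map (fun w => w.length + 1)).sum + 1
  | .n3 x => (x.map (fun w => (w.map (fun m => m.length + 1)).sum + 1)).sum + 1
  | .n4 x => (x.map (fun p => (p.map (fun w => (w.map (fun m => m.length + 1)).sum + 1)).sum + 1)).sum + 1

def ssz (st : List (PVNode × Int)) : Nat := (st.map (fun q => nsz q.1)).sum

theorem one_le_nsz (nd : PVNode) : 1 ≤ nsz nd := by cases nd <;> simp [nsz]

-- the while loop: head of `st` is the stack top.  Python pushes the children reversed onto the end
-- of its stack; prepending them in order to a head-top stack gives the identical pop order.
def bloop (n : Int) (st : List (PVNode × Int)) (out : List (List (List (List Int)))) :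
    List (List (List (List Int))) :=
  match st with
  | [] => out
  | (nd, md) :: rest =>
    if md ≤ 0 then bloop n rest out
    else
      match nd with
      | .n0 _ => bloop n rest out                       -- not a list
      | .n1 x =>
        if chk1 x n then bloop n rest (out ++ [[]])
        else bloop n (x.map (fun c => (PVNode.n0 c, md - 1)) ++ rest) out
      | .n2 x =>
        if chk2 x n then bloop n rest (out ++ [co2 x])
        else bloop n (x.map (fun c => (PVNode.n1 c, md - 1)) ++ rest) out
      | .n3 x =>
        if chk3 x n then bloop n rest (out ++ [x])
        else bloop n (x.map (fun c => (PVNode.n2 c, md - 1)) ++ rest) out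
      | .n4 x =>
        if chk4 x n then bloop n rest (out ++ [co4 x])
        else bloop n (x.map (fun c => (PVNode.n3 c, md - 1)) ++ rest) out
  termination_by ssz st
  decreasing_by
  · have h := one_le_nsz nd
    simp [ssz]
    omega
  all_goals simp [ssz, nsz, Function.comp_def]

def get_periods_alt (solution : List (List (List (List Int)))) (n : Int) :
    List (List (List (List Int))) :=
  bloop n [(PVNode.n4 solution, 10)] []

-- ===== PRECONDITION & SPEC =====
def Spec_get_periods (solution : List (List (List (List Int)))) (n : Int) (out : List (List (List (List Int)))) : Prop := out = get_periods_alt solution n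
instance (solution : List (List (List (List Int)))) (n : Int) (out : List (List (List (List Int)))) : Decidable (Spec_get_periods solution n out) := by unfold Spec_get_periods; infer_instance

-- ===== CLAIM (what is proved, stated in full; the proofs are below) =====
def Claim_equal_get_periods : Prop := ∀ (solution : List (List (List (List Int)))) (n : Int), Dom_get_periods solution n → Spec_get_periods solution n (get_periods solution n)

-- ===== LEMMAS AND PROOFS =====

-- generic: a fold whose step appends to its accumulator factors through the empty accumulator
theorem foldl_acc {α : Type} (g : List (List (List (List Int))) → α → List (List (List (List Int))))
    (h : ∀ p x, g p x = p ++ g [] x) :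
    ∀ (xs : List α) (p), xs.foldl g p = p ++ xs.foldl g [] := by
  intro xs
  induction xs with
  | nil => simp
  | cons x xs ih =>
    intro p
    simp only [List.foldl_cons]
    rw [ih (g p x), ih (g [] x), h p x, List.append_assoc]

theorem foldl_const {α : Type} (p : List (List (List (List Int)))) (xs : List α) :
    xs.foldl (fun acc _ => acc) p = p := by
  induction xs <;> simp [List.foldl_cons, *]

theorem findL1_acc (p : List (List (List (List Int)))) (obj : List Int) (md n : Int) :
    findL1 p obj md n = p ++ findL1 [] obj md n := by
  unfold findL1 findL0
  split_ifs <;> simp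

theorem findL2_acc (p : List (List (List (List Int)))) (obj : List (List Int)) (md n : Int) :
    findL2 p obj md n = p ++ findL2 [] obj md n := by
  unfold findL2
  split_ifs
  · simp
  · simp
  · exact foldl_acc _ (fun q x => findL1_acc q x (md - 1) n) obj p

theorem findL3_acc (p : List (List (List (List Int)))) (obj : List (List (List Int))) (md n : Int) :
    findL3 p obj md n = p ++ findL3 [] obj md n := by
  unfold findL3
  split_ifs
  · simp
  · simp
  · exact foldl_acc _ (fun q x => findL2_acc q x (md - 1) n) obj p

-- popping one node produces exactly what the recursive finder collects for it, then continues
theorem bloop_n0 (n i md : Int) (rest out) :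
    bloop n ((PVNode.n0 i, md) :: rest) out = bloop n rest out := by
  rw [bloop]
  split_ifs <;> rfl

theorem bloop_n1 (n : Int) (x : List Int) (md : Int) (rest out) :
    bloop n ((PVNode.n1 x, md) :: rest) out = bloop n rest (out ++ findL1 [] x md n) := by
  rw [bloop]
  unfold findL1
  split_ifs with h1 h2
  · simp
  · rfl
  · -- children are ints: the stack drops them one by one, the fold keeps its accumulator
    simp only [findL0, foldl_const, List.append_nil]
    clear h2
    induction x generalizing out with
    | nil => simp
    | cons c cs ih => rw [List.map_cons, List.cons_append, bloop_n0, ih]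

theorem bloop_n2 (n : Int) (x : List (List Int)) (md : Int) (rest out) :
    bloop n ((PVNode.n2 x, md) :: rest) out = bloop n rest (out ++ findL2 [] x md n) := by
  rw [bloop]
  unfold findL2
  split_ifs with h1 h2
  · simp
  · rfl
  · clear h2
    induction x generalizing out with
    | nil => simp
    | cons c cs ih =>
      rw [List.map_cons, List.cons_append, bloop_n1, ih]
      simp only [List.foldl_cons]
      rw [foldl_acc _ (fun q y => findL1_acc q y (md - 1) n) cs (findL1 [] c (md - 1) n),
        List.append_assoc]

theorem bloop_n3 (n : Int) (x : List (List (List Int))) (md : Int) (rest out) :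
    bloop n ((PVNode.n3 x, md) :: rest) out = bloop n rest (out ++ findL3 [] x md n) := by
  rw [bloop]
  unfold findL3
  split_ifs with h1 h2
  · simp
  · rfl
  · clear h2
    induction x generalizing out with
    | nil => simp
    | cons c cs ih =>
      rw [List.map_cons, List.cons_append, bloop_n2, ih]
      simp only [List.foldl_cons]
      rw [foldl_acc _ (fun q y => findL2_acc q y (md - 1) n) cs (findL2 [] c (md - 1) n),
        List.append_assoc]

theorem bloop_n4 (n : Int) (x : List (List (List (List Int)))) (md : Int) (rest out) :
    bloop n ((PVNode.n4 x, md) :: rest) out = bloop n rest (out ++ findL4 [] x md n) := by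
  rw [bloop]
  unfold findL4
  split_ifs with h1 h2
  · simp
  · rfl
  · clear h2
    induction x generalizing out with
    | nil => simp
    | cons c cs ih =>
      rw [List.map_cons, List.cons_append, bloop_n3, ih]
      simp only [List.foldl_cons]
      rw [foldl_acc _ (fun q y => findL3_acc q y (md - 1) n) cs (findL3 [] c (md - 1) n),
        List.append_assoc]

-- ===== VERDICT (by name: the statement is the Claim_ definition above) =====
theorem get_periods_spec : Claim_equal_get_periods := by
  intro solution n _
  unfold Spec_get_periods get_periods get_periods_alt
  rw [bloop_n4]
  simp [bloop]
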